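-- pv_equiv track=rewrite | github.com/IrinaProkofieva/ColorizeText | model/utils/visualisator.py | nearestDivisors
-- ===== SOURCE A (Python) =====
-- import math
--
-- def nearestDivisors(n):
--     divisors = (1, n)
--
--     i = int(math.sqrt(n))
--     while i >= 1:
--         if (n % i == 0):
--             if (n / i == i):
--                 return (i, i)
--             else:
--                 return (i, int(n / i))
--         i -= 1
--     return divisors
-- ===== SOURCE B (Python) =====
-- import math
--
-- def nearestDivisors(n):
--     best = None
--     for i in range(1, math.isqrt(n) + 1):
--         if n % i == 0:
--             best = i
--     if best is None:
--         return (1, n)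
--     return (best, n // best)
-- ===== Notes on version B (the rewrite author's own statement) =====
-- stated objective: alternative
-- what changed: B scans upward accumulating the largest divisor <= sqrt(n) in one full pass and computes the cofactor once with integer //, instead of A's downward while-loop with early return inside and a float n/i perfect-square branch.
import Mathlib
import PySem

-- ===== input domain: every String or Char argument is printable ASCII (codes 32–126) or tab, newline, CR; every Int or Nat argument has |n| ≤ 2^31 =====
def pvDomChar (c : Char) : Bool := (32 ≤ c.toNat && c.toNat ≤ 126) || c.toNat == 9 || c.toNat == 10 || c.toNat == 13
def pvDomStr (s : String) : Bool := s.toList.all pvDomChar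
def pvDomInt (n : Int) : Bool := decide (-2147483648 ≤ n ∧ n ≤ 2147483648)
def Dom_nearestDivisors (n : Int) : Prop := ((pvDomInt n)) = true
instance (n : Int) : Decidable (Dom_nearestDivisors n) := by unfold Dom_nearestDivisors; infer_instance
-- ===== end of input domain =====

-- B replaces A's downward early-return scan by a full upward pass accumulating the
-- largest divisor ≤ √n (objective: alternative decomposition, same cost).
-- Return-value equivalence only; neither program mutates anything.

-- ===== PORT A =====
-- A's while-loop, descending from i = int(math.sqrt(n)); fuel is i itself.
-- `int(math.sqrt(n))` is ported as Nat.sqrt n.toNat: exact for 0 ≤ n ≤ 2^31 < 2^52,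
-- where the correctly-rounded double sqrt truncates to the integer square root.
-- `n / i == i` and `int(n / i)` (float true division) are exact here too, since a
-- divisor quotient of n ≤ 2^31 is an integer < 2^53: ported via PySem.Int.floordiv.
def nearestDivisors.loop (n : Int) : Nat → Int × Int
  | 0 => (1, n)                                   -- i reached 0: return divisors
  | i + 1 =>
    let iI : Int := (i : Int) + 1
    if PySem.Int.mod n iI = 0 then
      if PySem.Int.floordiv n iI = iI then (iI, iI)
      else (iI, PySem.Int.floordiv n iI)
    else nearestDivisors.loop n i

def nearestDivisors (n : Int) : Int × Int :=
  nearestDivisors.loop n (Nat.sqrt n.toNat)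

-- ===== PORT B =====
-- `math.isqrt(n)` ported as Nat.sqrt n.toNat (exact integer sqrt, as in Python).
def nearestDivisors_alt (n : Int) : Int × Int :=
  let k : Int := (Nat.sqrt n.toNat : Int)
  let best : Option Int :=
    (PySem.List.pyRange 1 (k + 1) 1).foldl
      (fun b i => if PySem.Int.mod n i = 0 then some i else b) none
  match best with
  | none => (1, n)
  | some b => (b, PySem.Int.floordiv n b)

-- ===== PRECONDITION & SPEC =====
-- Pre_ excludes negative n, on which Python A raises ValueError (math.sqrt of a negative).
def Pre_nearestDivisors (n : Int) : Prop := 0 ≤ n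
instance (n : Int) : Decidable (Pre_nearestDivisors n) := by unfold Pre_nearestDivisors; infer_instance
def pvWitness_nearestDivisors : Int := (12)

def Spec_nearestDivisors (n : Int) (out : Int × Int) : Prop := out = nearestDivisors_alt n
instance (n : Int) (out : Int × Int) : Decidable (Spec_nearestDivisors n out) := by unfold Spec_nearestDivisors; infer_instance

-- ===== CLAIM (what is proved, stated in full; the proofs are below) =====
def Claim_equal_nearestDivisors : Prop := ∀ (n : Int), Dom_nearestDivisors n → Pre_nearestDivisors n → Spec_nearestDivisors n (nearestDivisors n)

-- ===== LEMMAS AND PROOFS =====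

-- B's accumulator after scanning 1..k, as a function of the fuel k.
def bestUpTo (n : Int) (k : Nat) : Option Int :=
  (PySem.List.pyRange 1 ((k : Int) + 1) 1).foldl
    (fun b i => if PySem.Int.mod n i = 0 then some i else b) none

theorem bestUpTo_succ (n : Int) (k : Nat) :
    bestUpTo n (k + 1) =
      if PySem.Int.mod n ((k : Int) + 1) = 0 then some ((k : Int) + 1)
      else bestUpTo n k := by
  unfold bestUpTo
  rw [show ((k + 1 : Nat) : Int) + 1 = (((k : Int) + 1) + 1) by push_cast; ring,
      PySem.List.pyRange_one_succ_right (by omega), List.foldl_append]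
  simp

theorem loop_eq_best (n : Int) (k : Nat) :
    nearestDivisors.loop n k =
      (match bestUpTo n k with
       | none => (1, n)
       | some b => (b, PySem.Int.floordiv n b)) := by
  induction k with
  | zero =>
    unfold bestUpTo
    rw [PySem.List.pyRange_one_eq_nil (by omega)]
    simp [nearestDivisors.loop]
  | succ k ih =>
    rw [bestUpTo_succ]
    unfold nearestDivisors.loop
    by_cases h : PySem.Int.mod n ((k : Int) + 1) = 0
    · rw [if_pos h, if_pos h]
      by_cases hsq : PySem.Int.floordiv n ((k : Int) + 1) = (k : Int) + 1
      · rw [if_pos hsq]; exact Prod.ext rfl hsq.symm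
      · rw [if_neg hsq]
    · rw [if_neg h, if_neg h, ih]

-- ===== VERDICT (by name: the statement is the Claim_ definition above) =====
theorem nearestDivisors_spec : Claim_equal_nearestDivisors := by
  intro n _ _
  unfold Spec_nearestDivisors nearestDivisors nearestDivisors_alt
  rw [loop_eq_best]
  rfl
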